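-- pv_equiv track=rewrite | github.com/shoark7/algorithm-with-python | problems_solving/algospot/naming.py | length_names
-- ===== SOURCE A (Python) =====
-- def get_presuffix_len(s):
--     N = len(s)
--     ret = [0] * (N+1)
--     begin, matched = 1, 0
--
--     while begin + matched < N:
--         if s[begin+matched] == s[matched]:
--             matched += 1
--             ret[begin+matched] = matched
--         else:
--             if not matched:
--                 begin += 1
--             else:
--                 begin += matched - ret[matched]
--                 matched = ret[matched]
--     return ret
--
-- def length_names(t):
--     pi = get_presuffix_len(t)
--     k = len(t)
--     ans = []
--
--     while k:
--         ans.append(k)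
--         k = pi[k]
--
--     ans.sort()
--     return ans
-- ===== SOURCE B (Python) =====
-- def length_names(t):
--     n = len(t)
--     return [L for L in range(1, n + 1) if t[:L] == t[n - L:]]
-- ===== Notes on version B (the rewrite author's own statement) =====
-- stated objective: simpler
-- what changed: Replaced the KMP failure-function computation plus failure-chain walk and final sort by a one-line scan that keeps each length L in 1..len(t) whose prefix equals the suffix of that length, which yields the border lengths already in ascending order.
import Mathlib
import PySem

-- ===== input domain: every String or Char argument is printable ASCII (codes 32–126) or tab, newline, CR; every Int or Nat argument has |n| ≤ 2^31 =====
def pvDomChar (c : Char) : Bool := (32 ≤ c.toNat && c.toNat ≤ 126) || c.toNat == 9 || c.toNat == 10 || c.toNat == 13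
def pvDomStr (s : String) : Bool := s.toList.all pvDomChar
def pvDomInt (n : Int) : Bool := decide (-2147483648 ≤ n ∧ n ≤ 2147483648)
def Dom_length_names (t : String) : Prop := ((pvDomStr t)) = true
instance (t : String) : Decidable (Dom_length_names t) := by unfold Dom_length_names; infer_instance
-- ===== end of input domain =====

-- B replaces the KMP failure function + failure-chain walk + sort by a direct ascending
-- scan over prefix lengths, keeping those whose prefix equals the suffix of that length (simpler).

-- ===== PORT A =====
-- the while-loop of get_presuffix_len; fuel only makes the recursion structural, 2*len+1 steps always suffice
def kmpLoop (s : List Char) (fuel : Nat) (ret : List Nat) (b m : Nat) : List Nat :=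
  match fuel with
  | 0 => ret
  | f + 1 =>
    if b + m < s.length then
      if s.getD (b + m) ' ' = s.getD m ' ' then
        kmpLoop s f (ret.set (b + m + 1) (m + 1)) b (m + 1)
      else if m = 0 then
        kmpLoop s f ret (b + 1) m
      else
        kmpLoop s f ret (b + (m - ret.getD m 0)) (ret.getD m 0)
    else ret

def get_presuffix_len (s : List Char) : List Nat :=
  kmpLoop s (2 * s.length + 1) (List.replicate (s.length + 1) 0) 1 0

-- the while-loop of length_names; k strictly decreases, so len+1 steps of fuel always suffice
def chainLoop (pi : List Nat) (fuel k : Nat) (ans : List Int) : List Int :=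
  match fuel with
  | 0 => ans
  | f + 1 => if k ≠ 0 then chainLoop pi f (pi.getD k 0) (ans ++ [(k : Int)]) else ans

def length_names (t : String) : List Int :=
  PySem.List.sorted
    (chainLoop (get_presuffix_len t.toList) (t.toList.length + 1) t.toList.length [])
    (fun x => x) false

-- ===== PORT B =====
-- t[:L] / t[n-L:] ported as take/drop: exact since 1 ≤ L ≤ n on every element of the range
def length_names_alt (t : String) : List Int :=
  (PySem.List.pyRange 1 ((t.toList.length : Int) + 1) 1).filter
    (fun L => t.toList.take L.toNat == t.toList.drop (t.toList.length - L.toNat))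

-- ===== PRECONDITION & SPEC =====
def Spec_length_names (t : String) (out : List Int) : Prop := out = length_names_alt t
instance (t : String) (out : List Int) : Decidable (Spec_length_names t out) := by unfold Spec_length_names; infer_instance

-- ===== CLAIM (what is proved, stated in full; the proofs are below) =====
def Claim_equal_length_names : Prop := ∀ (t : String), Dom_length_names t → Spec_length_names t (length_names t)

-- ===== LEMMAS AND PROOFS =====

-- c is a border length of s: the prefix of length c is also a suffix
abbrev isB (s : List Char) (c : Nat) : Prop := c ≤ s.length ∧ s.take c = s.drop (s.length - c)

-- the mathematical failure function: longest proper border length of s.take k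
def fb (s : List Char) (k : Nat) : Nat := Nat.findGreatest (fun c => isB (s.take k) c) (k - 1)

lemma getD_take (s : List Char) (i m : Nat) (him : i < m) :
    (s.take m).getD i ' ' = s.getD i ' ' := by
  simp [List.getD, him]

lemma isB_iff (s : List Char) (c : Nat) :
    isB s c ↔ c ≤ s.length ∧ ∀ i, i < c → s.getD i ' ' = s.getD (s.length - c + i) ' ' := by
  constructor
  · rintro ⟨hc, h⟩
    refine ⟨hc, fun i hi => ?_⟩
    have h1 : i < s.length := by omega
    have h2 : s.length - c + i < s.length := by omega
    rw [List.getD_eq_getElem s ' ' h1, List.getD_eq_getElem s ' ' h2]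
    have := congrArg (fun l : List Char => l[i]?) h
    simp only [List.getElem?_take, List.getElem?_drop, hi, if_pos] at this
    rw [List.getElem?_eq_getElem h1, List.getElem?_eq_getElem h2] at this
    exact Option.some.inj this
  · rintro ⟨hc, h⟩
    refine ⟨hc, ?_⟩
    apply List.ext_getElem
    · simp; omega
    · intro i h1 h2
      have hi : i < c := by simp at h1; exact h1.1
      have := h i hi
      rw [List.getD_eq_getElem s ' ' (by omega), List.getD_eq_getElem s ' ' (by omega)] at this
      simp [List.getElem_take, List.getElem_drop, this]

lemma isB_take_iff (s : List Char) (p c : Nat) (hp : p ≤ s.length) :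
    isB (s.take p) c ↔ c ≤ p ∧ ∀ i, i < c → s.getD i ' ' = s.getD (p - c + i) ' ' := by
  rw [isB_iff]
  have hl : (s.take p).length = p := by simp; omega
  rw [hl]
  constructor
  · rintro ⟨hc, h⟩
    refine ⟨hc, fun i hi => ?_⟩
    have := h i hi
    rwa [getD_take s i p (by omega), getD_take s (p - c + i) p (by omega)] at this
  · rintro ⟨hc, h⟩
    refine ⟨hc, fun i hi => ?_⟩
    rw [getD_take s i p (by omega), getD_take s (p - c + i) p (by omega)]
    exact h i hi

lemma isB_trans_up (s : List Char) (p m c : Nat) (hp : p ≤ s.length)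
    (hm : isB (s.take p) m) (hc : isB (s.take m) c) : isB (s.take p) c := by
  rw [isB_take_iff s p m hp] at hm
  rw [isB_take_iff s m c (by omega)] at hc
  rw [isB_take_iff s p c hp]
  refine ⟨by omega, fun i hi => ?_⟩
  have e1 : p - c + i = p - m + (m - c + i) := by omega
  rw [hc.2 i hi, e1, ← hm.2 (m - c + i) (by omega)]

lemma isB_trans_down (s : List Char) (p m c : Nat) (hp : p ≤ s.length)
    (hm : isB (s.take p) m) (hc : isB (s.take p) c) (hcm : c ≤ m) : isB (s.take m) c := by
  rw [isB_take_iff s p m hp] at hm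
  rw [isB_take_iff s p c hp] at hc
  rw [isB_take_iff s m c (by omega)]
  refine ⟨hcm, fun i hi => ?_⟩
  have e1 : p - m + (m - c + i) = p - c + i := by omega
  rw [hc.2 i hi, ← e1, ← hm.2 (m - c + i) (by omega)]

lemma isB_succ (s : List Char) (p c : Nat) (hp : p < s.length) (hcp : c ≤ p) :
    isB (s.take (p + 1)) (c + 1) ↔ (isB (s.take p) c ∧ s.getD c ' ' = s.getD p ' ') := by
  rw [isB_take_iff s (p+1) (c+1) (by omega), isB_take_iff s p c (by omega)]
  constructor
  · rintro ⟨_, h⟩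
    refine ⟨⟨hcp, fun i hi => ?_⟩, ?_⟩
    · have := h i (by omega)
      have e : p + 1 - (c + 1) + i = p - c + i := by omega
      rwa [e] at this
    · have := h c (by omega)
      have e : p + 1 - (c + 1) + c = p := by omega
      rwa [e] at this
  · rintro ⟨⟨_, h⟩, hc⟩
    refine ⟨by omega, fun i hi => ?_⟩
    have e : p + 1 - (c + 1) + i = p - c + i := by omega
    rw [e]
    rcases Nat.lt_or_ge i c with h2 | h2
    · exact h i h2
    · have : i = c := by omega
      subst this
      have e2 : p - i + i = p := by omega
      rw [e2]; exact hc

lemma isB_zero (s : List Char) : isB s 0 := ⟨Nat.zero_le _, by simp⟩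

lemma isB_len (s : List Char) : isB s s.length := ⟨le_rfl, by simp⟩

lemma fb_lt (s : List Char) (k : Nat) (hk : 1 ≤ k) : fb s k < k :=
  lt_of_le_of_lt (Nat.findGreatest_le _) (by omega)

lemma fb_isB (s : List Char) (k : Nat) : isB (s.take k) (fb s k) := by
  exact Nat.findGreatest_spec (P := fun c => isB (s.take k) c) (Nat.zero_le _) (isB_zero _)

lemma fb_max (s : List Char) (k c : Nat) (h : isB (s.take k) c) (hck : c < k) : c ≤ fb s k :=
  Nat.le_findGreatest (by omega) h

-- loop invariant of kmpLoop, with p = b + m the current scan position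
def KInv (s : List Char) (ret : List Nat) (b m : Nat) : Prop :=
  1 ≤ b ∧ b + m ≤ s.length ∧ ret.length = s.length + 1 ∧
  (∀ i, i ≤ b + m → ret.getD i 0 = fb s i) ∧
  (∀ i, b + m < i → ret.getD i 0 = 0) ∧
  isB (s.take (b + m)) m ∧
  (∀ c, isB (s.take (b + m)) c → m < c → c < b + m → s.getD c ' ' ≠ s.getD (b + m) ' ')

lemma kmpLoop_correct : ∀ (fuel : Nat) (s : List Char) (ret : List Nat) (b m : Nat),
    KInv s ret b m → (s.length - (b + m)) + (s.length - b) < fuel →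
    ∀ i, i ≤ s.length → (kmpLoop s fuel ret b m).getD i 0 = fb s i := by
  intro fuel
  induction fuel with
  | zero => intro s ret b m _ hf; omega
  | succ f ih =>
    intro s ret b m hinv hf i hi
    obtain ⟨hb, hpn, hlen, I4, I5, I6, I7⟩ := hinv
    by_cases hlt : b + m < s.length
    · rw [kmpLoop, if_pos hlt]
      by_cases heq : s.getD (b + m) ' ' = s.getD m ' '
      · rw [if_pos heq]
        have hnew : isB (s.take (b + m + 1)) (m + 1) :=
          (isB_succ s (b + m) m hlt (by omega)).mpr ⟨I6, heq.symm⟩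
        have hfb : fb s (b + m + 1) = m + 1 := by
          apply le_antisymm
          · by_contra hgt
            have hFb : isB (s.take (b + m + 1)) (fb s (b + m + 1)) := fb_isB s (b + m + 1)
            have hFlt : fb s (b + m + 1) < b + m + 1 := fb_lt s (b + m + 1) (by omega)
            have hF1 : fb s (b + m + 1) - 1 + 1 = fb s (b + m + 1) := by omega
            have hsp := (isB_succ s (b + m) (fb s (b + m + 1) - 1) hlt (by omega)).mp
              (by rw [hF1]; exact hFb)
            exact I7 (fb s (b + m + 1) - 1) hsp.1 (by omega) (by omega) hsp.2
          · exact fb_max s (b + m + 1) (m + 1) hnew (by omega)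
        apply ih
        · refine ⟨hb, by omega, by simp [hlen], ?_, ?_, ?_, ?_⟩
          · intro j hj
            rcases Nat.lt_or_ge j (b + m + 1) with h2 | h2
            · have hne : b + m + 1 ≠ j := by omega
              rw [show b + (m + 1) = b + m + 1 by omega] at hj
              simp only [List.getD, List.getElem?_set, if_neg hne]
              exact I4 j (by omega)
            · have hj' : j = b + m + 1 := by omega
              subst hj'
              have hlt2 : b + m + 1 < ret.length := by omega
              simp [List.getD, hlt2, hfb]
          · intro j hj
            have hne : b + m + 1 ≠ j := by omega
            simp only [List.getD, List.getElem?_set, if_neg hne]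
            exact I5 j (by omega)
          · rw [show b + (m + 1) = b + m + 1 by omega]; exact hnew
          · intro c hc hmc hcp
            rw [show b + (m + 1) = b + m + 1 by omega] at hc hcp
            have := fb_max s (b + m + 1) c hc (by omega)
            omega
        · omega
        · exact hi
      · rw [if_neg heq]
        by_cases hm0 : m = 0
        · rw [if_pos hm0]
          subst hm0
          have hfb0 : fb s (b + 0 + 1) = 0 := by
            by_contra hgt
            have hpos : 0 < fb s (b + 0 + 1) := Nat.pos_of_ne_zero hgt
            have hFb : isB (s.take (b + 0 + 1)) (fb s (b + 0 + 1)) := fb_isB s (b + 0 + 1)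
            have hFlt : fb s (b + 0 + 1) < b + 0 + 1 := fb_lt s (b + 0 + 1) (by omega)
            have hF1 : fb s (b + 0 + 1) - 1 + 1 = fb s (b + 0 + 1) := by omega
            have hsp := (isB_succ s (b + 0) (fb s (b + 0 + 1) - 1) hlt (by omega)).mp
              (by rw [hF1]; exact hFb)
            rcases Nat.eq_zero_or_pos (fb s (b + 0 + 1) - 1) with h0 | h0
            · rw [h0] at hsp; exact heq hsp.2.symm
            · exact I7 (fb s (b + 0 + 1) - 1) hsp.1 (by omega) (by omega) hsp.2
          apply ih
          · refine ⟨by omega, by omega, hlen, ?_, ?_, isB_zero _, ?_⟩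
            · intro j hj
              rcases Nat.lt_or_ge j (b + 1) with h2 | h2
              · exact I4 j (by omega)
              · have hj' : j = b + 1 := by omega
                subst hj'
                rw [I5 (b + 1) (by omega)]
                rw [show b + 1 + 0 = b + 0 + 1 by omega, hfb0]
            · intro j hj; exact I5 j (by omega)
            · intro c hc hmc hcp
              rw [show b + 1 + 0 = b + 0 + 1 by omega] at hc hcp
              have := fb_max s (b + 0 + 1) c hc (by omega)
              omega
          · omega
          · exact hi
        · rw [if_neg hm0]
          have hm1 : 1 ≤ m := by omega
          have hretm : ret.getD m 0 = fb s m := I4 m (by omega)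
          have hm'lt : fb s m < m := fb_lt s m hm1
          rw [hretm]
          have hp' : b + (m - fb s m) + fb s m = b + m := by omega
          apply ih
          · refine ⟨by omega, by omega, hlen, ?_, ?_, ?_, ?_⟩
            · simp only [hp']; exact I4
            · simp only [hp']; exact I5
            · simp only [hp']
              exact isB_trans_up s (b + m) m (fb s m) (by omega) I6 (fb_isB s m)
            · simp only [hp']
              intro c hc hmc hcp
              rcases Nat.lt_trichotomy c m with h2 | h2 | h2
              · have hcb : isB (s.take m) c := isB_trans_down s (b + m) m c (by omega) I6 hc (by omega)
                have := fb_max s m c hcb (by omega)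
                omega
              · subst h2; exact fun h => heq h.symm
              · exact I7 c hc (by omega) hcp
          · omega
          · exact hi
    · rw [kmpLoop, if_neg hlt]
      exact I4 i (by omega)

lemma getD_replicate_zero (n i : Nat) : (List.replicate n (0 : Nat)).getD i 0 = 0 := by
  rcases Nat.lt_or_ge i n with h | h
  · simp [List.getD, h]
  · have : (List.replicate n (0 : Nat))[i]? = none := by
      rw [List.getElem?_eq_none_iff]; simpa using h
    simp [List.getD, this]

lemma fb_one_eq_zero (s : List Char) : fb s 1 = 0 := rfl

lemma fb_zero_eq_zero (s : List Char) : fb s 0 = 0 := rfl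

lemma pi_correct (s : List Char) (hs : 1 ≤ s.length) :
    ∀ i, i ≤ s.length → (get_presuffix_len s).getD i 0 = fb s i := by
  intro i hi
  apply kmpLoop_correct (2 * s.length + 1) s _ 1 0 _ (by omega) i hi
  refine ⟨le_rfl, by omega, by simp, ?_, ?_, isB_zero _, ?_⟩
  · intro j hj
    interval_cases j
    · rw [getD_replicate_zero, fb_zero_eq_zero]
    · rw [getD_replicate_zero, fb_one_eq_zero]
  · intro j _; exact getD_replicate_zero _ _
  · intro c hc h1 h2; omega

-- all border lengths of s in [1, k], ascending
def ascB (s : List Char) (k : Nat) : List Nat :=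
  ((List.range k).map (· + 1)).filter (fun c => s.take c == s.drop (s.length - c))

lemma ascB_succ (s : List Char) (j : Nat) :
    ascB s (j + 1) =
      ascB s j ++ (if (s.take (j + 1) == s.drop (s.length - (j + 1))) = true then [j + 1] else []) := by
  simp only [ascB, List.range_succ, List.map_append, List.filter_append, List.map_cons,
    List.map_nil, List.filter_cons, List.filter_nil]

lemma ascB_flat (s : List Char) : ∀ (d j : Nat),
    (∀ c, j < c → c ≤ j + d → (s.take c == s.drop (s.length - c)) = false) →
    ascB s (j + d) = ascB s j := by
  intro d
  induction d with
  | zero => intro j _; rfl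
  | succ d ihd =>
    intro j h
    rw [show j + (d + 1) = (j + d) + 1 from rfl, ascB_succ, h (j + d + 1) (by omega) (by omega)]
    simp only [Bool.false_eq_true, if_false, List.append_nil]
    exact ihd j (fun c h1 h2 => h c h1 (by omega))

lemma isB_self_of_take (s : List Char) (k c : Nat) (hk : isB s k) (hc : isB (s.take k) c) :
    isB s c := by
  have := isB_trans_up s s.length k c le_rfl (by simpa [List.take_length] using hk) hc
  simpa [List.take_length] using this

lemma ascB_split (s : List Char) (k : Nat) (hk1 : 1 ≤ k) (hkn : k ≤ s.length) (hkB : isB s k) :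
    ascB s k = ascB s (fb s k) ++ [k] := by
  have hwin : ∀ c, fb s k < c → c ≤ k - 1 → (s.take c == s.drop (s.length - c)) = false := by
    intro c h1 h2
    rw [Bool.eq_false_iff]
    intro hp
    have hcB : isB s c := ⟨by omega, by simpa using hp⟩
    have hcK : isB (s.take k) c := isB_trans_down s s.length k c le_rfl
      (by simpa [List.take_length] using hkB) (by simpa [List.take_length] using hcB) (by omega)
    have := fb_max s k c hcK (by omega)
    omega
  have hpredk : (s.take k == s.drop (s.length - k)) = true := by
    simpa using hkB.2
  have h1 : ascB s k = ascB s (k - 1) ++ [k] := by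
    rw [show k = (k - 1) + 1 by omega, ascB_succ, show k - 1 + 1 = k by omega, hpredk]
    simp
  have hflt : fb s k < k := fb_lt s k hk1
  have h2 : ascB s (k - 1) = ascB s (fb s k) := by
    rw [show k - 1 = fb s k + (k - 1 - fb s k) by omega]
    exact ascB_flat s (k - 1 - fb s k) (fb s k) (fun c hc1 hc2 => hwin c hc1 (by omega))
  rw [h1, h2]

lemma chain_eq (s : List Char) (pi : List Nat)
    (hpi : ∀ i, i ≤ s.length → pi.getD i 0 = fb s i) :
    ∀ (fuel k : Nat) (acc : List Int), k < fuel → k ≤ s.length → isB s k →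
      chainLoop pi fuel k acc = acc ++ ((ascB s k).reverse).map (fun c : Nat => (c : Int)) := by
  intro fuel
  induction fuel with
  | zero => intro k acc h; omega
  | succ f ih =>
    intro k acc hkf hkn hkB
    rw [chainLoop]
    by_cases hk0 : k = 0
    · subst hk0
      simp [ascB]
    · rw [if_pos hk0, hpi k hkn]
      have hflt : fb s k < k := fb_lt s k (by omega)
      have hfbB : isB s (fb s k) := isB_self_of_take s k (fb s k) hkB (fb_isB s k)
      rw [ih (fb s k) (acc ++ [(k : Int)]) (by omega) (by omega) hfbB]
      rw [ascB_split s k (by omega) hkn hkB]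
      simp

lemma ascB_pairwise (s : List Char) (k : Nat) : (ascB s k).Pairwise (· < ·) := by
  apply List.Pairwise.filter
  exact List.pairwise_lt_range.map _ (fun a b h => by omega)

lemma pyRange_filter_eq (s : List Char) :
    (PySem.List.pyRange 1 ((s.length : Int) + 1) 1).filter
        (fun L => s.take L.toNat == s.drop (s.length - L.toNat)) =
      (ascB s s.length).map (fun c : Nat => (c : Int)) := by
  have hn : (((s.length : Int) + 1 - 1)).toNat = s.length := by omega
  have hrange : PySem.List.pyRange 1 ((s.length : Int) + 1) 1 =
      ((List.range s.length).map (fun c => c + 1)).map (fun c : Nat => (c : Int)) := by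
    rw [PySem.List.pyRange_one, hn, List.map_map]
    apply List.map_congr_left
    intro a _
    simp only [Function.comp_apply]
    push_cast
    ring
  rw [hrange, List.filter_map]
  simp only [ascB]
  congr 1

lemma length_names_eq_alt (t : String) : length_names t = length_names_alt t := by
  rcases Nat.eq_zero_or_pos t.toList.length with h0 | h0
  · have hs : t.toList = [] := List.eq_nil_of_length_eq_zero h0
    rw [length_names, length_names_alt, hs]
    rfl
  · rw [length_names, length_names_alt]
    have hA := chain_eq t.toList (get_presuffix_len t.toList) (pi_correct t.toList h0)
      (t.toList.length + 1) t.toList.length [] (by omega) le_rfl (isB_len t.toList)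
    rw [hA, List.nil_append, pyRange_filter_eq]
    apply PySem.List.sorted_eq_of_perm_of_pairwise_lt
    · rw [List.map_reverse]
      exact (List.reverse_perm _).symm
    · exact ((ascB_pairwise t.toList t.toList.length).map _ (fun a b h => by exact_mod_cast h))

-- ===== VERDICT (by name: the statement is the Claim_ definition above) =====
theorem length_names_spec : Claim_equal_length_names := by
  intro t _
  unfold Spec_length_names
  exact length_names_eq_alt t
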